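-- pv_equiv track=rewrite | github.com/C-SladeHunter/netflixAlgorithm | skeleton-code/skeleton-starter-code.py | neighGen
-- ===== SOURCE A (Python) =====
-- def neighGen(rating,userRatings,exclude):
-- 	K = dict()
-- 	n = len(userRatings)
-- 	M = 0
-- 	if (n >= 3):
-- 		while (len(list(K.values())) <= 1):
-- 			M += 1
-- 			for i in range(0,n):
-- 				if i != exclude:
-- 					if (abs(rating - userRatings[i]) <= M):
-- 						K[i] = userRatings[i]
-- 	else:
-- 		while (len(list(K.values())) <= 0):
-- 			M += 1
-- 			for i in range(0,n):
-- 				if i != exclude: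
-- 					if (abs(rating - userRatings[i]) <= M):
-- 						K[i] = userRatings[i]
-- 	return K
-- ===== SOURCE B (Python) =====
-- def neighGen(rating, userRatings, exclude):
--     # sort-based: compute each eligible distance once; the threshold is the
--     # required-th smallest distance (at least 1); collect everyone within it.
--     n = len(userRatings)
--     need = 2 if n >= 3 else 1
--     items = [(max(1, abs(rating - r)), i, r)
--              for i, r in enumerate(userRatings) if i != exclude]
--     items.sort(key=lambda t: t[0])  # stable: ties keep index order
--     M = items[need - 1][0]
--     return {i: r for d, i, r in items if d <= M}
-- ===== Notes on version B (the rewrite author's own statement) =====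
-- stated objective: faster
-- what changed: Instead of re-scanning all users for every threshold M = 1,2,3,... until enough neighbours accumulate, B computes each eligible user's distance once, sorts, reads the required-th smallest (clamped to at least 1) as the final threshold, and collects everyone within it in one filtered pass.
import Mathlib
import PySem

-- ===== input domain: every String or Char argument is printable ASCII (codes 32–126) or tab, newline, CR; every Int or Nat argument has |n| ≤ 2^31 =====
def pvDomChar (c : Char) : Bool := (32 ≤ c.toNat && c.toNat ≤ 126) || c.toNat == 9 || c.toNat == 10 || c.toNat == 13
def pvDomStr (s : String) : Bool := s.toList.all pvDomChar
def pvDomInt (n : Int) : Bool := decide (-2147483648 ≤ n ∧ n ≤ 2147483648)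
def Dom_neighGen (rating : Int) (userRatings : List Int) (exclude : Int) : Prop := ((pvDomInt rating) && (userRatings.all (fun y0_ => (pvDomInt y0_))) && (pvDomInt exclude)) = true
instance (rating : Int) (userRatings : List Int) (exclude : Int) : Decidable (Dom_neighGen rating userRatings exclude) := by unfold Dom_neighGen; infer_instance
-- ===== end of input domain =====

-- B replaces A's grow-the-threshold rescan loop by: compute each eligible distance once,
-- sort, take the required-th smallest (at least 1) as threshold, collect within (objective: faster).
-- Pre_ excludes exactly the inputs with too few eligible neighbours, on which A's while loop never terminates.


-- ===== PORT A =====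
-- one 'for i in range(0,n)' pass of A's while-body at threshold M
def pvPass (rating : Int) (ur : List Int) (exclude : Int) (M : Int) (K : PySem.Dict Int Int) : PySem.Dict Int Int :=
  (PySem.List.pyRange 0 ur.length 1).foldl
    (fun K i =>
      if i ≠ exclude then
        (if |rating - PySem.List.pyGetD ur i 0| ≤ M then K.insert i (PySem.List.pyGetD ur i 0) else K)
      else K) K

-- A's while loop: 'while len(list(K.values())) <= lim: M += 1; <pass>'.
-- fuel is only a totality guard: under Pre_ the loop provably exits before fuel runs out.
def pvWhile (rating : Int) (ur : List Int) (exclude : Int) (lim : Int) : Nat → Int → PySem.Dict Int Int → PySem.Dict Int Int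
  | 0, _, K => K
  | fuel + 1, M, K =>
    if (K.values.length : Int) ≤ lim then
      pvWhile rating ur exclude lim fuel (M + 1) (pvPass rating ur exclude (M + 1) K)
    else K

def neighGen (rating : Int) (userRatings : List Int) (exclude : Int) : List (Int × Int) :=
  let n : Int := userRatings.length
  -- totality guard: under Pre_ the loop exits within max(1, max |rating - x|) iterations
  let fuel : Nat := (userRatings.foldl (fun a x => max a |rating - x|) 1).toNat
  if n ≥ 3 then (pvWhile rating userRatings exclude 1 fuel 0 PySem.Dict.empty).items
  else (pvWhile rating userRatings exclude 0 fuel 0 PySem.Dict.empty).items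

-- ===== PORT B =====
def neighGen_alt (rating : Int) (userRatings : List Int) (exclude : Int) : List (Int × Int) :=
  let n : Int := userRatings.length
  let need : Int := if n ≥ 3 then 2 else 1
  let items := PySem.List.sorted
      (((PySem.List.enumerate userRatings).filter (fun p => p.1 ≠ exclude)).map
        (fun p => (max 1 |rating - p.2|, p.1, p.2)))
      (fun t => t.1) false
  let M := (PySem.List.pyGetD items (need - 1) (0, 0, 0)).1
  -- the dict comprehension keys i are distinct, so the dict IS this association list
  (items.filter (fun t => t.1 ≤ M)).map (fun t => (t.2.1, t.2.2))

-- ===== PRECONDITION & SPEC =====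
-- Pre_ excludes exactly the inputs on which A's while loop never terminates (fewer eligible
-- indices i ≠ exclude than the 2 (n ≥ 3) resp. 1 required): the empty list, and a singleton
-- list with exclude = 0.
def Pre_neighGen (rating : Int) (userRatings : List Int) (exclude : Int) : Prop :=
  userRatings ≠ [] ∧ (userRatings.length = 1 → exclude ≠ 0)
instance (rating : Int) (userRatings : List Int) (exclude : Int) : Decidable (Pre_neighGen rating userRatings exclude) := by unfold Pre_neighGen; infer_instance

def pvWitness_neighGen : Int × List Int × Int := (4, [1, 5, 2, 9], 2)

def Spec_neighGen (rating : Int) (userRatings : List Int) (exclude : Int) (out : List (Int × Int)) : Prop := out = neighGen_alt rating userRatings exclude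
instance (rating : Int) (userRatings : List Int) (exclude : Int) (out : List (Int × Int)) : Decidable (Spec_neighGen rating userRatings exclude out) := by unfold Spec_neighGen; infer_instance

-- ===== CLAIM (what is proved, stated in full; the proofs are below) =====
def Claim_equal_neighGen : Prop := ∀ (rating : Int) (userRatings : List Int) (exclude : Int), Dom_neighGen rating userRatings exclude → Pre_neighGen rating userRatings exclude → Spec_neighGen rating userRatings exclude (neighGen rating userRatings exclude)

-- ===== LEMMAS AND PROOFS =====

-- the clamped distance key, the eligible (index, rating) pairs, and their stable key-sort
def pvKf (rating : Int) (p : Int × Int) : Int := max 1 |rating - p.2|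
def pvElig (ur : List Int) (exclude : Int) : List (Int × Int) :=
  (PySem.List.enumerate ur).filter (fun p => p.1 ≠ exclude)
def pvSortedE (rating : Int) (ur : List Int) (exclude : Int) : List (Int × Int) :=
  PySem.List.sorted (pvElig ur exclude) (pvKf rating) false

-- ported pass = fold of the conditional insert over the eligible pairs
theorem pvPass_eq (rating : Int) (ur : List Int) (exclude : Int) (M : Int) (K : PySem.Dict Int Int) :
    pvPass rating ur exclude M K =
      (pvElig ur exclude).foldl
        (fun K p => if |rating - p.2| ≤ M then K.insert p.1 p.2 else K) K := by
  rw [pvPass, pvElig, List.foldl_filter, PySem.List.enumerate_eq_map_pyRange ur 0, List.foldl_map]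
  apply PySem.List.foldl_congr_mem
  intro K' i _
  by_cases h : i = exclude <;> simp [h]

-- generic step lemma: one pass at threshold M+1 over pairs whose membership in K is
-- exactly 'pvKf ≤ M' appends exactly the pairs with pvKf = M+1, in list order
theorem pvFold_step (rating M : Int) (l : List (Int × Int)) :
    ∀ K : PySem.Dict Int Int, 0 ≤ M → K.keys.Nodup → (l.map (·.1)).Nodup →
      (∀ p ∈ l, K.get? p.1 = if pvKf rating p ≤ M then some p.2 else none) →
      (l.foldl (fun K p => if |rating - p.2| ≤ M + 1 then K.insert p.1 p.2 else K) K).items =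
        K.items ++ l.filter (fun p => pvKf rating p = M + 1) := by
  induction l with
  | nil => intro K _ _ _ _; simp
  | cons p rest ih =>
    intro K hM hK hnd hget
    have hp := hget p (by simp)
    have hnd' : (rest.map (·.1)).Nodup := (List.nodup_cons.mp hnd).2
    have hpn : p.1 ∉ rest.map (·.1) := (List.nodup_cons.mp hnd).1
    rw [List.foldl_cons, List.filter_cons]
    by_cases hd : |rating - p.2| ≤ M + 1
    · simp only [hd, if_true]
      by_cases hle : pvKf rating p ≤ M
      · -- already present: overwrite with the same value is the identity
        have hgetp : K.get? p.1 = some p.2 := by rw [hp]; simp [hle]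
        have hcont : K.contains p.1 = true := by
          rw [PySem.Dict.contains_eq_isSome_get?, hgetp]; rfl
        have hitems : (K.insert p.1 p.2).items = K.items := by
          rw [PySem.Dict.items_insert_of_contains _ _ hcont]
          have : ∀ q ∈ K.items, (if (q.1 == p.1) = true then (p.1, p.2) else q) = id q := by
            intro q hq
            by_cases hq1 : (q.1 == p.1) = true
            · have h2 : K.get? q.1 = some q.2 := PySem.Dict.get?_of_mem_items K (by simpa using hq) hK
              have hq1' : q.1 = p.1 := by simpa using hq1
              rw [hq1', hgetp] at h2
              simp only [hq1, if_true, id]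
              exact Prod.ext hq1'.symm (by simpa using h2)
            · simp [hq1]
          rw [List.map_congr_left this, List.map_id]
        have hkeys : (K.insert p.1 p.2).keys.Nodup := PySem.Dict.nodup_keys_insert _ _ _ hK
        have hgets : ∀ q ∈ rest, (K.insert p.1 p.2).get? q.1 = if pvKf rating q ≤ M then some q.2 else none := by
          intro q hq
          rw [PySem.Dict.get?_insert_of_ne]
          · exact hget q (by simp [hq])
          · intro h; exact hpn (h ▸ List.mem_map_of_mem hq)
        rw [ih (K.insert p.1 p.2) hM hkeys hnd' hgets, hitems]
        simp only [show ¬ (pvKf rating p = M + 1) by omega, decide_false]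
        simp
      · -- fresh key: append
        have hgetp : K.get? p.1 = none := by rw [hp]; simp [hle]
        have hcont : K.contains p.1 = false := by
          rw [PySem.Dict.contains_eq_isSome_get?, hgetp]; rfl
        have hitems : (K.insert p.1 p.2).items = K.items ++ [(p.1, p.2)] := by
          rw [PySem.Dict.items_insert_of_not_contains _ _ hcont]
        have hkf : pvKf rating p = M + 1 := by
          have h1 : pvKf rating p ≤ M + 1 := by
            unfold pvKf; omega
          omega
        have hkeys : (K.insert p.1 p.2).keys.Nodup := PySem.Dict.nodup_keys_insert _ _ _ hK
        have hgets : ∀ q ∈ rest, (K.insert p.1 p.2).get? q.1 = if pvKf rating q ≤ M then some q.2 else none := by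
          intro q hq
          rw [PySem.Dict.get?_insert_of_ne]
          · exact hget q (by simp [hq])
          · intro h; exact hpn (h ▸ List.mem_map_of_mem hq)
        rw [ih (K.insert p.1 p.2) hM hkeys hnd' hgets, hitems]
        simp [hkf]
    · simp only [hd, if_false]
      have hkf : ¬ (pvKf rating p = M + 1) := by unfold pvKf; omega
      rw [ih K hM hK hnd' (fun q hq => hget q (by simp [hq]))]
      simp [hkf]

-- stability of PySem's insertion sort: elements with one fixed key keep their original order
theorem pvInsertBy_filter {α κ : Type} [LinearOrder κ] (key : α → κ) (c : κ) (x : α) (l : List α)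
    (hl : l.Pairwise (fun a b => key a ≤ key b)) :
    (PySem.List.insertBy (fun a b => decide (key a < key b)) x l).filter (fun y => decide (key y = c)) =
      if key x = c then l.filter (fun y => decide (key y = c)) ++ [x]
      else l.filter (fun y => decide (key y = c)) := by
  induction l with
  | nil => simp [PySem.List.insertBy]; split <;> simp_all
  | cons y ys ih =>
    rw [List.pairwise_cons] at hl
    obtain ⟨hy, hys⟩ := hl
    by_cases hlt : key x < key y
    · rw [PySem.List.insertBy]; simp only [hlt, decide_true, if_true]
      by_cases hc : key x = c
      · have hnil : (y :: ys).filter (fun z => decide (key z = c)) = [] := by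
          apply List.filter_eq_nil_iff.mpr
          intro z hz
          simp only [decide_eq_true_eq]
          rcases hz with _ | hz
          · exact fun h => absurd (h ▸ hlt) (by simp [hc])
          · have := hy z (by assumption)
            intro h; rw [h, ← hc] at this; exact absurd (lt_of_lt_of_le hlt this) (lt_irrefl _)
        simp [hc, hnil]
      · simp [hc]
    · rw [PySem.List.insertBy]; simp only [hlt, decide_false, Bool.false_eq_true, if_false]
      rw [List.filter_cons, List.filter_cons, ih hys]
      by_cases hc : key x = c <;> by_cases hyc : key y = c <;> simp [hc, hyc]

theorem pvSorted_filter_stable {α κ : Type} [LinearOrder κ] (key : α → κ) (c : κ) (l : List α) :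
    (PySem.List.sorted l key false).filter (fun y => decide (key y = c)) =
      l.filter (fun y => decide (key y = c)) := by
  induction l using List.reverseRecOn with
  | nil => rfl
  | append_singleton l x ih =>
    have h1 : PySem.List.sorted (l ++ [x]) key false =
        PySem.List.insertBy (fun a b => decide (key a < key b)) x (PySem.List.sorted l key false) := by
      simp [PySem.List.sorted, List.foldl_append]
    rw [h1, pvInsertBy_filter key c x _ (PySem.List.sorted_pairwise l key), ih,
      List.filter_append]
    by_cases hc : key x = c <;> simp [hc]

-- in a key-sorted list, raising the threshold by one appends the new key-class
theorem pvFilter_split {α : Type} (key : α → Int) (M : Int) (l : List α)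
    (hl : l.Pairwise (fun a b => key a ≤ key b)) :
    l.filter (fun y => decide (key y ≤ M + 1)) =
      l.filter (fun y => decide (key y ≤ M)) ++ l.filter (fun y => decide (key y = M + 1)) := by
  induction l with
  | nil => rfl
  | cons y ys ih =>
    rw [List.pairwise_cons] at hl
    obtain ⟨hy, hys⟩ := hl
    rw [List.filter_cons, List.filter_cons, List.filter_cons, ih hys]
    by_cases h1 : key y ≤ M
    · simp [h1, show key y ≤ M + 1 by omega, show ¬ (key y = M + 1) by omega]
    · by_cases h2 : key y = M + 1
      · have hnil : ys.filter (fun z => decide (key z ≤ M)) = [] := by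
          apply List.filter_eq_nil_iff.mpr
          intro z hz
          have := hy z hz
          simp only [decide_eq_true_eq]; omega
        simp [h2, hnil]
      · by_cases h3 : key y ≤ M + 1
        · omega
        · simp [h1, h2, h3]

theorem pvNodupFstE (ur : List Int) (exclude : Int) :
    ((pvElig ur exclude).map (·.1)).Nodup := by
  have h1 : ((PySem.List.enumerate ur 0).map (·.1)).Nodup := by
    rw [PySem.List.map_fst_enumerate]
    exact PySem.List.nodup_pyRange_one 0 _
  exact h1.sublist (List.Sublist.map _ List.filter_sublist)

theorem pvPermSE (rating : Int) (ur : List Int) (exclude : Int) :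
    (pvSortedE rating ur exclude).Perm (pvElig ur exclude) :=
  PySem.List.sorted_perm _ _ _

theorem pvNodupFstS (rating : Int) (ur : List Int) (exclude : Int) :
    ((pvSortedE rating ur exclude).map (·.1)).Nodup :=
  (((pvPermSE rating ur exclude).map _).nodup_iff).mpr (pvNodupFstE ur exclude)

theorem pvNodupFstFilter (rating : Int) (ur : List Int) (exclude : Int) (q : (Int × Int) → Bool) :
    (((pvSortedE rating ur exclude).filter q).map (·.1)).Nodup :=
  (pvNodupFstS rating ur exclude).sublist (List.Sublist.map _ List.filter_sublist)

-- membership in K characterised by 'pvKf ≤ M' when K.items is the filtered sort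
theorem pvGetFact (rating : Int) (ur : List Int) (exclude : Int) (M : Int) (K : PySem.Dict Int Int)
    (hK : K.keys.Nodup)
    (hit : K.items = (pvSortedE rating ur exclude).filter (fun p => decide (pvKf rating p ≤ M))) :
    ∀ p ∈ pvElig ur exclude, K.get? p.1 = if pvKf rating p ≤ M then some p.2 else none := by
  intro p hp
  by_cases hle : pvKf rating p ≤ M
  · have hmem : (p.1, p.2) ∈ K.items := by
      rw [hit]
      exact List.mem_filter.mpr ⟨((pvPermSE rating ur exclude).mem_iff).mpr hp, by simpa using hle⟩
    rw [PySem.Dict.get?_of_mem_items K hmem hK]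
    simp [hle]
  · rw [if_neg hle]
    rw [PySem.Dict.get?_eq_none_iff_not_mem_keys]
    intro hmemk
    have : p.1 ∈ K.items.map (·.1) := hmemk
    rw [hit] at this
    obtain ⟨q, hq, hq1⟩ := List.mem_map.mp this
    have hqS := (List.mem_filter.mp hq).1
    have hqE : q ∈ pvElig ur exclude := ((pvPermSE rating ur exclude).mem_iff).mp hqS
    have : q = p := List.inj_on_of_nodup_map (pvNodupFstE ur exclude) hqE hp hq1
    subst this
    exact hle (by simpa using (List.mem_filter.mp hq).2)

-- counting in a key-sorted list: elements with key ≤ c versus the j-th key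
theorem pvCountGe {α : Type} (key : α → Int) (c : Int) (l : List α)
    (hl : l.Pairwise (fun a b => key a ≤ key b)) (j : Nat) (hj : j < l.length)
    (hc : key l[j] ≤ c) :
    (j + 1 ≤ (l.filter (fun y => decide (key y ≤ c))).length) := by
  have hsplit : l = l.take (j+1) ++ l.drop (j+1) := (List.take_append_drop _ _).symm
  have htake : (l.take (j+1)).filter (fun y => decide (key y ≤ c)) = l.take (j+1) := by
    apply List.filter_eq_self.mpr
    intro a ha
    obtain ⟨i, hi, hia⟩ := List.mem_take_iff_getElem.mp ha
    rcases Nat.lt_or_ge i j with h | h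
    · have := List.pairwise_iff_getElem.mp hl i j (by omega) hj h
      simp only [decide_eq_true_eq]; rw [← hia]; omega
    · have : i = j := by omega
      subst this; simp only [decide_eq_true_eq]; rw [← hia]; omega
  conv_rhs => rw [hsplit]
  rw [List.filter_append, List.length_append, htake, List.length_take]
  omega

theorem pvCountLe {α : Type} (key : α → Int) (c : Int) (l : List α)
    (hl : l.Pairwise (fun a b => key a ≤ key b)) (j : Nat) (hj : j < l.length)
    (hc : c < key l[j]) :
    ((l.filter (fun y => decide (key y ≤ c))).length ≤ j) := by
  have hsplit : l = l.take j ++ l.drop j := (List.take_append_drop _ _).symm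
  have hdrop : (l.drop j).filter (fun y => decide (key y ≤ c)) = [] := by
    apply List.filter_eq_nil_iff.mpr
    intro a ha
    obtain ⟨i, hi, hia⟩ := List.mem_iff_getElem.mp ha
    rw [List.getElem_drop] at hia
    have hilen : i < l.length - j := by simpa using hi
    have hkey : key l[j] ≤ key a := by
      rcases Nat.eq_zero_or_pos i with h0 | h0
      · subst h0; rw [← hia]; simp
      · have := List.pairwise_iff_getElem.mp hl j (j + i) hj (by omega) (by omega)
        rw [hia] at this; exact this
    simp only [decide_eq_true_eq]; omega
  conv_lhs => rw [hsplit]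
  rw [List.filter_append, List.length_append, hdrop]
  have := List.length_filter_le (fun y => decide (key y ≤ c)) (l.take j)
  simp only [List.length_nil, List.length_take] at *
  omega

-- A's while loop, started anywhere below the final threshold, lands on the final filter
theorem pvLoop (rating : Int) (ur : List Int) (exclude : Int) (j : Nat) (Mstar : Int)
    (hj : j < (pvSortedE rating ur exclude).length)
    (hMs : Mstar = pvKf rating ((pvSortedE rating ur exclude)[j])) :
    ∀ (fuel : Nat) (M : Int) (K : PySem.Dict Int Int),
      0 ≤ M → M ≤ Mstar → (Mstar - M).toNat ≤ fuel → K.keys.Nodup →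
      K.items = (pvSortedE rating ur exclude).filter (fun p => decide (pvKf rating p ≤ M)) →
      (pvWhile rating ur exclude (j : Int) fuel M K).items =
        (pvSortedE rating ur exclude).filter (fun p => decide (pvKf rating p ≤ Mstar)) := by
  have hpw : (pvSortedE rating ur exclude).Pairwise (fun a b => pvKf rating a ≤ pvKf rating b) :=
    PySem.List.sorted_pairwise _ _
  intro fuel
  induction fuel with
  | zero =>
    intro M K h0 hle hfuel hK hit
    have : M = Mstar := by omega
    subst this
    simpa [pvWhile] using hit
  | succ fuel ih =>
    intro M K h0 hle hfuel hK hit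
    rw [pvWhile]
    have hvl : K.values.length = ((pvSortedE rating ur exclude).filter (fun p => decide (pvKf rating p ≤ M))).length := by
      simp only [PySem.Dict.values, hit, List.length_map]
    by_cases hMeq : M = Mstar
    · subst hMeq
      rw [if_neg]
      · rw [hit]
      · have := pvCountGe (pvKf rating) M _ hpw j hj (le_of_eq hMs.symm)
        rw [hvl]
        omega
    · have hMlt : M < Mstar := by omega
      rw [if_pos]
      · have hK'it : (pvPass rating ur exclude (M + 1) K).items =
            (pvSortedE rating ur exclude).filter (fun p => decide (pvKf rating p ≤ M + 1)) := by
          rw [pvPass_eq,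
            pvFold_step rating M (pvElig ur exclude) K h0 hK (pvNodupFstE ur exclude)
              (pvGetFact rating ur exclude M K hK hit),
            hit, pvFilter_split (pvKf rating) M _ hpw]
          congr 1
          exact (pvSorted_filter_stable (pvKf rating) (M + 1) (pvElig ur exclude)).symm
        have hK'nd : (pvPass rating ur exclude (M + 1) K).keys.Nodup := by
          have : (pvPass rating ur exclude (M + 1) K).keys =
              (pvPass rating ur exclude (M + 1) K).items.map (·.1) := by
            simp only [PySem.Dict.keys]
          rw [this, hK'it]
          exact pvNodupFstFilter rating ur exclude _
        exact ih (M + 1) _ (by omega) (by omega) (by omega) hK'nd hK'it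
      · have := pvCountLe (pvKf rating) M _ hpw j hj (by omega)
        rw [hvl]
        omega

-- the B port's stable sort of mapped triples is the mapped stable sort of the pairs
theorem pvInsertBy_map {α β κ : Type} [LT κ] [DecidableLT κ] (f : α → β) (key : β → κ) (x : α) (l : List α) :
    PySem.List.insertBy (fun a b => decide (key a < key b)) (f x) (l.map f) =
      (PySem.List.insertBy (fun a b => decide (key (f a) < key (f b))) x l).map f := by
  induction l with
  | nil => simp [PySem.List.insertBy]
  | cons y ys ih =>
    rw [List.map_cons, PySem.List.insertBy, PySem.List.insertBy]
    by_cases h : key (f x) < key (f y) <;> simp [h, ih]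

theorem pvFoldIns_map {α β κ : Type} [LT κ] [DecidableLT κ] (f : α → β) (key : β → κ) :
    ∀ (l : List α) (acc : List α),
      List.foldl (fun acc x => PySem.List.insertBy (fun a b => decide (key a < key b)) x acc) (acc.map f) (l.map f) =
        (List.foldl (fun acc x => PySem.List.insertBy (fun a b => decide (key (f a) < key (f b))) x acc) acc l).map f := by
  intro l
  induction l with
  | nil => intro acc; simp
  | cons y ys ih =>
    intro acc
    rw [List.map_cons, List.foldl_cons, List.foldl_cons, pvInsertBy_map f key y acc,
      ← ih (PySem.List.insertBy (fun a b => decide (key (f a) < key (f b))) y acc)]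

theorem pvSorted_map {α β κ : Type} [LT κ] [DecidableLT κ] (f : α → β) (key : β → κ) (l : List α) :
    PySem.List.sorted (l.map f) key false =
      (PySem.List.sorted l (fun a => key (f a)) false).map f := by
  have h := pvFoldIns_map f key l []
  simpa [PySem.List.sorted] using h

-- at most one enumerate pair can carry the excluded index
theorem pvLen1 (l : List (Int × Int)) (c : Int)
    (hnd : (l.map (·.1)).Nodup) (hall : ∀ p ∈ l, p.1 = c) : l.length ≤ 1 := by
  rcases l with _ | ⟨a, _ | ⟨b, t⟩⟩
  · simp
  · simp
  · exfalso
    have h1 : a.1 = c := hall a (by simp)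
    have h2 : b.1 = c := hall b (by simp)
    simp only [List.map_cons, List.nodup_cons, List.mem_cons, List.mem_map] at hnd
    exact hnd.1 (Or.inl (by rw [h1, h2])) |>.elim

theorem pvEligLen (ur : List Int) (exclude : Int) :
    ur.length ≤ (pvElig ur exclude).length + 1 := by
  have hperm := List.filter_append_perm (fun p : Int × Int => decide (p.1 ≠ exclude)) (PySem.List.enumerate ur)
  have hlen : (pvElig ur exclude).length +
      ((PySem.List.enumerate ur).filter (fun p => !decide (p.1 ≠ exclude))).length =
      ur.length := by
    have := hperm.length_eq
    simp only [List.length_append] at this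
    rw [pvElig]
    rw [this, PySem.List.length_enumerate]
  have hnd : (((PySem.List.enumerate ur).filter (fun p => !decide (p.1 ≠ exclude))).map (·.1)).Nodup := by
    have h1 : ((PySem.List.enumerate ur 0).map (·.1)).Nodup := by
      rw [PySem.List.map_fst_enumerate]
      exact PySem.List.nodup_pyRange_one 0 _
    exact h1.sublist (List.Sublist.map _ List.filter_sublist)
  have hle := pvLen1 _ exclude hnd (by
    intro p hp
    have := (List.mem_filter.mp hp).2
    simpa using this)
  omega

theorem pvEligLen_one (ur : List Int) (exclude : Int) (h1 : ur.length = 1) (hx : exclude ≠ 0) :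
    (pvElig ur exclude).length = 1 := by
  obtain ⟨x, rfl⟩ := List.length_eq_one_iff.mp h1
  simp [pvElig, PySem.List.enumerate, Ne.symm hx]

theorem pvFoldMaxInit (rating : Int) (l : List Int) : ∀ (b : Int),
    b ≤ l.foldl (fun a x => max a |rating - x|) b := by
  induction l with
  | nil => intro b; simp
  | cons y ys ih =>
    intro b
    exact le_trans (le_max_left _ _) (ih (max b |rating - y|))

theorem pvFoldMaxMem (rating : Int) (l : List Int) : ∀ (b x : Int), x ∈ l →
    |rating - x| ≤ l.foldl (fun a x => max a |rating - x|) b := by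
  induction l with
  | nil => intro b x hx; simp at hx
  | cons y ys ih =>
    intro b x hx
    rcases List.mem_cons.mp hx with rfl | hx
    · exact le_trans (le_max_right _ _) (pvFoldMaxInit rating ys _)
    · exact ih _ x hx

-- A's branch evaluated: loop from the empty dict with full fuel yields the final filter
theorem pvBoth (rating : Int) (ur : List Int) (exclude : Int) (j : Nat)
    (hj : j < (pvSortedE rating ur exclude).length) :
    (pvWhile rating ur exclude (j : Int) ((ur.foldl (fun a x => max a |rating - x|) 1).toNat)
        0 PySem.Dict.empty).items =
      (pvSortedE rating ur exclude).filter
        (fun p => decide (pvKf rating p ≤ pvKf rating ((pvSortedE rating ur exclude)[j]))) := by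
  have hmem : ((pvSortedE rating ur exclude)[j]).2 ∈ ur := by
    have h1 : (pvSortedE rating ur exclude)[j] ∈ pvSortedE rating ur exclude := List.getElem_mem hj
    have h2 : (pvSortedE rating ur exclude)[j] ∈ pvElig ur exclude :=
      ((pvPermSE rating ur exclude).mem_iff).mp h1
    have h3 : (pvSortedE rating ur exclude)[j] ∈ PySem.List.enumerate ur :=
      List.mem_of_mem_filter h2
    have h4 := List.mem_map_of_mem (f := (·.2)) h3
    rwa [PySem.List.map_snd_enumerate] at h4
  have hMle : pvKf rating ((pvSortedE rating ur exclude)[j]) ≤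
      ur.foldl (fun a x => max a |rating - x|) 1 :=
    max_le (pvFoldMaxInit rating ur 1) (pvFoldMaxMem rating ur 1 _ hmem)
  have hM1 : 1 ≤ pvKf rating ((pvSortedE rating ur exclude)[j]) := le_max_left _ _
  apply pvLoop rating ur exclude j _ hj rfl
  · omega
  · omega
  · have := Int.toNat_le_toNat (show pvKf rating ((pvSortedE rating ur exclude)[j]) - 0 ≤
        ur.foldl (fun a x => max a |rating - x|) 1 by omega)
    simpa using this
  · exact PySem.Dict.nodup_keys_empty
  · symm
    apply List.filter_eq_nil_iff.mpr
    intro p _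
    have : 1 ≤ pvKf rating p := le_max_left _ _
    simp only [decide_eq_true_eq]
    omega

-- B's branch evaluated: the sorted-filter-map pipeline yields the same final filter
theorem pvAltEval (rating : Int) (ur : List Int) (exclude : Int) (j : Nat)
    (hj : j < (pvSortedE rating ur exclude).length) :
    (let items := PySem.List.sorted
        (((PySem.List.enumerate ur).filter (fun p => p.1 ≠ exclude)).map
          (fun p => (max 1 |rating - p.2|, p.1, p.2)))
        (fun t => t.1) false
     (items.filter (fun t => t.1 ≤ (PySem.List.pyGetD items ((j : Int)) (0, 0, 0)).1)).map
        (fun t => (t.2.1, t.2.2)))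
    = (pvSortedE rating ur exclude).filter
        (fun p => decide (pvKf rating p ≤ pvKf rating ((pvSortedE rating ur exclude)[j]))) := by
  have hitems : PySem.List.sorted
      (((PySem.List.enumerate ur).filter (fun p => p.1 ≠ exclude)).map
        (fun p => (max 1 |rating - p.2|, p.1, p.2)))
      (fun t => t.1) false
      = (pvSortedE rating ur exclude).map (fun p => (max 1 |rating - p.2|, p.1, p.2)) :=
    pvSorted_map _ _ _
  simp only [hitems]
  have hlen : j < ((pvSortedE rating ur exclude).map
      (fun p => (max 1 |rating - p.2|, p.1, p.2))).length := by
    simpa using hj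
  rw [PySem.List.pyGetD_eq_getElem _ _ (by positivity) (by exact_mod_cast hlen)]
  rw [List.filter_map]
  rw [List.map_map]
  have hidx : (((pvSortedE rating ur exclude).map
      (fun p => (max 1 |rating - p.2|, p.1, p.2)))[(j : Int).toNat]'(by simpa using hlen)) =
      (max 1 |rating - ((pvSortedE rating ur exclude)[j]).2|,
        ((pvSortedE rating ur exclude)[j]).1, ((pvSortedE rating ur exclude)[j]).2) := by
    simp
  rw [hidx]
  have hmapid : ((fun t : Int × Int × Int => (t.2.1, t.2.2)) ∘
      (fun p : Int × Int => (max 1 |rating - p.2|, p.1, p.2))) = id := by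
    funext p; rfl
  rw [hmapid, List.map_id]
  rfl

theorem pvMain (rating : Int) (ur : List Int) (exclude : Int) :
    Pre_neighGen rating ur exclude →
    neighGen rating ur exclude = neighGen_alt rating ur exclude := by
  rintro ⟨hne, hone⟩
  have hSElen : (pvSortedE rating ur exclude).length = (pvElig ur exclude).length :=
    PySem.List.length_sorted _ _ _
  have hEl := pvEligLen ur exclude
  have hpos : 0 < ur.length := List.length_pos_iff.mpr hne
  by_cases h3 : ((ur.length : Int)) ≥ 3
  · have hn3 : 3 ≤ ur.length := by exact_mod_cast h3
    have hj : 1 < (pvSortedE rating ur exclude).length := by omega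
    have hA := pvBoth rating ur exclude 1 hj
    simp only [Nat.cast_one] at hA
    have hB := pvAltEval rating ur exclude 1 hj
    simp only [Nat.cast_one] at hB
    rw [neighGen, neighGen_alt]
    simp only [if_pos h3]
    rw [hA, ← hB]
    norm_num
  · have hj : 0 < (pvSortedE rating ur exclude).length := by
      rcases Nat.lt_or_ge ur.length 2 with h2 | h2
      · have h1 : ur.length = 1 := by omega
        have := pvEligLen_one ur exclude h1 (hone h1)
        omega
      · omega
    have hA := pvBoth rating ur exclude 0 hj
    simp only [Nat.cast_zero] at hA
    have hB := pvAltEval rating ur exclude 0 hj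
    simp only [Nat.cast_zero] at hB
    rw [neighGen, neighGen_alt]
    simp only [if_neg h3]
    rw [hA, ← hB]
    norm_num

-- ===== VERDICT (by name: the statement is the Claim_ definition above) =====
theorem neighGen_spec : Claim_equal_neighGen := by
  intro rating ur exclude _ hpre
  exact pvMain rating ur exclude hpre
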